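-- pv_equiv track=rewrite | github.com/kaczmm/toponymy | ck3_script.py | lws
-- ===== SOURCE A (Python) =====
-- def lws(input_string):
-- 	ws = ""
-- 	i = 0
-- 	for i in range(len(input_string)):
-- 		if input_string[i] == " ":
-- 			ws += " "
-- 		elif input_string[i] == "\t":
-- 			ws += "\t"
-- 			i+=1
-- 		else:
-- 			break
-- 	return ws
-- ===== SOURCE B (Python) =====
-- import re
--
-- _LWS_RE = re.compile(r'[ \t]*')
--
-- def lws(input_string):
--     return _LWS_RE.match(input_string).group()
-- ===== Notes on version B (the rewrite author's own statement) =====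
-- stated objective: idiomatic
-- what changed: Replaced the per-character branching accumulator loop (with break) by a single regex match capturing the leading [ \t]* span.
import Mathlib
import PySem

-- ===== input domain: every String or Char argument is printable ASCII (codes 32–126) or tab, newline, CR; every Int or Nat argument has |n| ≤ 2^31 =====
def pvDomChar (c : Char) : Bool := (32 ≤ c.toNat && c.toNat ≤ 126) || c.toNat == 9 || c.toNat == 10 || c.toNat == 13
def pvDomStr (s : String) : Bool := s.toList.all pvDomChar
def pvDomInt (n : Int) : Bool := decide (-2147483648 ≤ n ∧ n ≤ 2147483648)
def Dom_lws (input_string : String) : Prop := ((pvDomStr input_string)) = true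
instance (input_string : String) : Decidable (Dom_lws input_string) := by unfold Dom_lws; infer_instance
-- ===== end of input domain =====

-- B replaces A's per-character branching accumulator loop with a regex capturing the leading [ \t]* span (idiomatic).
-- ===== PORT A =====
-- A's for-loop over indices with accumulator `ws` and break: ported as structural recursion over the characters,
-- same branch order, break = return ws.
def lwsLoop : List Char → List Char → List Char
  | [], ws => ws
  | c :: rest, ws =>
    if c = ' ' then lwsLoop rest (ws ++ [' '])
    else if c = '\t' then lwsLoop rest (ws ++ ['\t'])
    else ws

def lws (input_string : String) : String := String.mk (lwsLoop input_string.toList [])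

-- ===== PORT B =====
-- re.match(r'[ \t]*', s).group() = the maximal leading run of ' '/'\t' characters; ported exactly as takeWhile.
def lws_alt (input_string : String) : String :=
  String.mk (input_string.toList.takeWhile (fun c => c = ' ' || c = '\t'))

-- ===== PRECONDITION & SPEC =====
def Spec_lws (input_string : String) (out : String) : Prop := out = lws_alt input_string
instance (input_string : String) (out : String) : Decidable (Spec_lws input_string out) := by unfold Spec_lws; infer_instance

-- ===== CLAIM (what is proved, stated in full; the proofs are below) =====
def Claim_equal_lws : Prop := ∀ (input_string : String), Dom_lws input_string → Spec_lws input_string (lws input_string)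

-- ===== LEMMAS AND PROOFS =====
lemma lwsLoop_eq (l ws : List Char) :
    lwsLoop l ws = ws ++ l.takeWhile (fun c => c = ' ' || c = '\t') := by
  induction l generalizing ws with
  | nil => simp [lwsLoop]
  | cons c rest ih =>
    by_cases h1 : c = ' '
    · simp [lwsLoop, h1, ih, List.takeWhile]
    · by_cases h2 : c = '\t'
      · simp [lwsLoop, h2, ih, List.takeWhile]
      · simp [lwsLoop, h1, h2, List.takeWhile]


-- ===== VERDICT (by name: the statement is the Claim_ definition above) =====
theorem lws_spec : Claim_equal_lws := by
  intro s _
  unfold Spec_lws lws lws_alt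
  rw [lwsLoop_eq]
  simp
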